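-- pv_equiv track=rewrite | github.com/victoriaferrario/uba-intro-programacion | Parciales/simulacro_parcial.py | mayor_cantidad_ap_consecutivas
-- ===== SOURCE A (Python) =====
-- def mayor_cantidad_ap_consecutivas(v: list[int], x: int) -> int:
--     cant: int = 0
--     mayor_cant: int = 0
--     for i in range (len(v)):
--         if v[i] == x:
--             cant += 1
--         else:
--             if cant > mayor_cant: mayor_cant = cant
--             cant = 0
--
--     if cant > mayor_cant: mayor_cant = cant
--     return mayor_cant
-- ===== SOURCE B (Python) =====
-- def mayor_cantidad_ap_consecutivas(v: list[int], x: int) -> int: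
--     # decompose the list into maximal runs of equal values; answer is the longest run of x
--     best = 0
--     i = 0
--     n = len(v)
--     while i < n:
--         j = i + 1
--         while j < n and v[j] == v[i]:
--             j += 1
--         if v[i] == x and j - i > best:
--             best = j - i
--         i = j
--     return best
-- ===== Notes on version B (the rewrite author's own statement) =====
-- stated objective: alternative
-- what changed: Replaces the running-counter-with-post-loop-flush scan by a run decomposition: an outer loop advances over maximal runs of equal values (inner scan finds each run's end) and keeps the longest run whose value is x.
import Mathlib
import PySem

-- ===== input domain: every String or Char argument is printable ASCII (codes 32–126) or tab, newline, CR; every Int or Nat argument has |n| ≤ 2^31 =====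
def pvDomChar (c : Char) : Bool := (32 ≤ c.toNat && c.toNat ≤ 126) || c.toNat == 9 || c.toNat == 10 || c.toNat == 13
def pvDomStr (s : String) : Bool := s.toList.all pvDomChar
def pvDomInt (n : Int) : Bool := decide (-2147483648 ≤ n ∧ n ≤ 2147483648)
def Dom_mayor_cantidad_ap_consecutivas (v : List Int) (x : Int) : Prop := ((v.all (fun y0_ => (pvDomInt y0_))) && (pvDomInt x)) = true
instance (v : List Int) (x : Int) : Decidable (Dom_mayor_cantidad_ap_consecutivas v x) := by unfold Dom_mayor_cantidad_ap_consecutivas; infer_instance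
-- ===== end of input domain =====

-- B replaces A's running-counter-with-flush scan by a run decomposition (consume each
-- maximal run of equal values, keep the longest run of x); alternative, same O(n) cost.


-- ===== PORT A =====
-- A: single pass keeping (cant, mayor_cant); flush cant into mayor_cant after the loop.
def mayor_cantidad_ap_consecutivas (v : List Int) (x : Int) : Int :=
  let s := v.foldl (fun (s : Int × Int) vi =>
    if vi = x then (s.1 + 1, s.2)
    else (0, if s.1 > s.2 then s.1 else s.2)) (0, 0)
  if s.1 > s.2 then s.1 else s.2

-- ===== PORT B =====
-- length of the maximal prefix of the tail equal to a (Source B's inner `while j < n and v[j] == v[i]` scan)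
def pvRunLen (a : Int) : List Int → Int
  | [] => 0
  | b :: t => if b = a then 1 + pvRunLen a t else 0

-- outer loop of Source B: consume one maximal run per step
def mayor_cantidad_ap_consecutivas_alt (v : List Int) (x : Int) : Int :=
  match v with
  | [] => 0
  | a :: t =>
    let k := pvRunLen a t
    let best := mayor_cantidad_ap_consecutivas_alt (t.drop k.toNat) x
    if a = x ∧ k + 1 > best then k + 1 else best
termination_by v.length
decreasing_by
  simp only [List.length_drop, List.length_cons]; omega

-- ===== PRECONDITION & SPEC =====
def Spec_mayor_cantidad_ap_consecutivas (v : List Int) (x : Int) (out : Int) : Prop := out = mayor_cantidad_ap_consecutivas_alt v x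
instance (v : List Int) (x : Int) (out : Int) : Decidable (Spec_mayor_cantidad_ap_consecutivas v x out) := by unfold Spec_mayor_cantidad_ap_consecutivas; infer_instance

-- ===== CLAIM (what is proved, stated in full; the proofs are below) =====
def Claim_equal_mayor_cantidad_ap_consecutivas : Prop := ∀ (v : List Int) (x : Int), Dom_mayor_cantidad_ap_consecutivas v x → Spec_mayor_cantidad_ap_consecutivas v x (mayor_cantidad_ap_consecutivas v x)

-- ===== LEMMAS AND PROOFS =====

theorem pvRunLen_nonneg (a : Int) (t : List Int) : 0 ≤ pvRunLen a t := by
  induction t with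
  | nil => simp [pvRunLen]
  | cons b t ih => simp only [pvRunLen]; split <;> omega

-- A's loop as a structural recursion on the list
def aLoop (x cant mayor : Int) : List Int → Int
  | [] => if cant > mayor then cant else mayor
  | a :: t =>
    if a = x then aLoop x (cant + 1) mayor t
    else aLoop x 0 (if cant > mayor then cant else mayor) t

theorem foldl_eq_aLoop (x : Int) (t : List Int) : ∀ cant mayor : Int,
    (let s := t.foldl (fun (s : Int × Int) vi =>
      if vi = x then (s.1 + 1, s.2)
      else (0, if s.1 > s.2 then s.1 else s.2)) (cant, mayor)
     if s.1 > s.2 then s.1 else s.2) = aLoop x cant mayor t := by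
  induction t with
  | nil => intro cant mayor; simp [aLoop]
  | cons a t ih =>
    intro cant mayor
    simp only [List.foldl_cons, aLoop]
    by_cases h : a = x <;> simp [h, ← ih]

-- mayor-free core of A's loop
def hLoop (x cant : Int) : List Int → Int
  | [] => cant
  | a :: t => if a = x then hLoop x (cant + 1) t else max cant (hLoop x 0 t)

theorem hLoop_nonneg (x : Int) (t : List Int) : ∀ cant : Int, 0 ≤ cant → 0 ≤ hLoop x cant t := by
  induction t with
  | nil => intro cant h; simpa [hLoop]
  | cons a t ih =>
    intro cant h
    simp only [hLoop]
    split
    · exact ih _ (by omega)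
    · have := ih 0 le_rfl; omega

theorem aLoop_eq_max (x : Int) (t : List Int) : ∀ cant mayor : Int,
    aLoop x cant mayor t = max mayor (hLoop x cant t) := by
  induction t with
  | nil => intro cant mayor; simp only [aLoop, hLoop]; split <;> omega
  | cons a t ih =>
    intro cant mayor
    simp only [aLoop, hLoop]
    split
    · exact ih _ _
    · rw [ih]; split <;> omega

-- pushing cant through an initial run of x
theorem hLoop_run (x : Int) (t : List Int) : ∀ cant : Int, 0 ≤ cant →
    hLoop x cant t = max (cant + pvRunLen x t) (hLoop x 0 (t.drop (pvRunLen x t).toNat)) := by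
  induction t with
  | nil => intro cant h; simp [hLoop, pvRunLen]; omega
  | cons a t ih =>
    intro cant h
    by_cases ha : a = x
    · have hk := pvRunLen_nonneg x t
      simp only [hLoop, pvRunLen, ha, if_pos trivial]
      rw [ih (cant + 1) (by omega)]
      have : (1 + pvRunLen x t).toNat = (pvRunLen x t).toNat + 1 := by omega
      rw [this, List.drop_succ_cons]
      ring_nf
    · simp only [hLoop, pvRunLen, if_neg ha]
      have h0 := hLoop_nonneg x t 0 le_rfl
      simp only [Int.toNat_zero, List.drop_zero, add_zero, hLoop, if_neg ha]
      omega

-- dropping a run of a non-x value does not change hLoop x 0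
theorem hLoop_drop_run (x a : Int) (ha : a ≠ x) (t : List Int) :
    hLoop x 0 (t.drop (pvRunLen a t).toNat) = hLoop x 0 t := by
  induction t with
  | nil => simp [pvRunLen]
  | cons b t ih =>
    by_cases hb : b = a
    · have hk := pvRunLen_nonneg a t
      simp only [pvRunLen, if_pos hb]
      have : (1 + pvRunLen a t).toNat = (pvRunLen a t).toNat + 1 := by omega
      rw [this, List.drop_succ_cons, ih]
      have h0 := hLoop_nonneg x t 0 le_rfl
      simp only [hLoop, hb, if_neg ha]
      omega
    · simp [pvRunLen, hb]

theorem alt_eq_hLoop_aux (x : Int) : ∀ (n : Nat) (v : List Int), v.length ≤ n →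
    mayor_cantidad_ap_consecutivas_alt v x = hLoop x 0 v := by
  intro n
  induction n with
  | zero =>
    intro v hv
    have : v = [] := List.eq_nil_of_length_eq_zero (by omega)
    subst this; simp [mayor_cantidad_ap_consecutivas_alt, hLoop]
  | succ n ihn =>
    intro v hv
    match v with
    | [] => simp [mayor_cantidad_ap_consecutivas_alt, hLoop]
    | a :: t =>
    rw [mayor_cantidad_ap_consecutivas_alt]
    have hlen : (t.drop (pvRunLen a t).toNat).length ≤ n := by
      simp only [List.length_cons] at hv
      simp only [List.length_drop]; omega
    have ih := ihn (t.drop (pvRunLen a t).toNat) hlen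
    simp only [] at ih ⊢
    by_cases ha : a = x
    · subst ha
      have hk := pvRunLen_nonneg a t
      rw [ih]
      have hr := hLoop_run a t 1 (by omega)
      have h0 := hLoop_nonneg a (t.drop (pvRunLen a t).toNat) 0 le_rfl
      simp only [hLoop, true_and, if_true, zero_add]
      rw [hr]
      split <;> omega
    · rw [ih, hLoop_drop_run x a ha]
      have h0 := hLoop_nonneg x t 0 le_rfl
      simp only [hLoop, if_neg ha]
      have : ¬ (a = x ∧ pvRunLen a t + 1 > hLoop x 0 t) := fun ⟨h, _⟩ => ha h
      rw [if_neg this]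
      omega

-- ===== VERDICT (by name: the statement is the Claim_ definition above) =====
theorem mayor_cantidad_ap_consecutivas_spec : Claim_equal_mayor_cantidad_ap_consecutivas := by
  intro v x _
  show _ = _
  rw [mayor_cantidad_ap_consecutivas, foldl_eq_aLoop, aLoop_eq_max,
    alt_eq_hLoop_aux x v.length v le_rfl]
  have := hLoop_nonneg x v 0 le_rfl
  omega
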